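-- pv_equiv track=rewrite | github.com/DancingOnAir/LeetcodePythonSolution | array/1488_avoid_flood_in_the_city.py | avoidFlood1
-- ===== SOURCE A (Python) =====
-- from typing import List
-- from collections import defaultdict
-- from bisect import bisect_left
--
-- def avoidFlood1(rains: List[int]) -> List[int]:
--     res = []
--     dd = defaultdict(list)
--
--     for i, val in enumerate(rains):
--         if val:
--             if not len(dd[val]):
--                 res.append(-1)
--             else:
--                 if not len(dd[0]):
--                     return []
--                 else:
--                     if dd[0][-1] < dd[val][0]:
--                         return []
--
--                     pos = bisect_left(dd[0], dd[val].pop())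
--                     res[dd[0][pos]] = val
--                     dd[0].pop(pos)
--                     res.append(-1)
--         else:
--             res.append(1)
--         dd[val] += [i]
--
--     return res
-- ===== SOURCE B (Python) =====
-- from typing import List
--
--
-- def _find(parent, j):
--     # root: smallest day >= j that is not consumed; with path compression
--     r = j
--     while r in parent:
--         r = parent[r]
--     while j in parent:
--         parent[j], j = r, parent[j]
--     return r
--
--
-- def avoidFlood1(rains: List[int]) -> List[int]:
--     # union-find "next free day": parent maps a consumed day past itself
--     res = []
--     parent = {}
--     last = {}
--     for i, v in enumerate(rains):
--         if v:
--             if v in last: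
--                 d = _find(parent, last[v] + 1)
--                 if d >= i:
--                     return []
--                 res[d] = v
--                 parent[d] = d + 1
--             res.append(-1)
--             last[v] = i
--             parent[i] = i + 1
--         else:
--             res.append(1)
--     return res
-- ===== Notes on version B (the rewrite author's own statement) =====
-- stated objective: alternative
-- what changed: Replaces A's defaultdict-of-lists with bisect search and middle pops on the sorted dry-day list by a union-find 'next free day' map with path compression plus a last-rain-day dict.
import Mathlib
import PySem

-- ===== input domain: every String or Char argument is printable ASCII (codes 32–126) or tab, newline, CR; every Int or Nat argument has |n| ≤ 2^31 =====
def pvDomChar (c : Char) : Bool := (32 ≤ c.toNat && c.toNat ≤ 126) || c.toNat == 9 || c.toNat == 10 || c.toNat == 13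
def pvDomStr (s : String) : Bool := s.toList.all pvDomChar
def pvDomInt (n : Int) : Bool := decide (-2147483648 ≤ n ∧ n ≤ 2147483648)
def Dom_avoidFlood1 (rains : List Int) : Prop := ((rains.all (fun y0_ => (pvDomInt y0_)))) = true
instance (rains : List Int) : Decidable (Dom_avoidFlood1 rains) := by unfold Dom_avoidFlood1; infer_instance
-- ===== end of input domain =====

-- B replaces A's sorted dry-day list (bisect + middle pops) by a union-find
-- "next free day" structure with path compression (objective: alternative).

-- ===== PORT A =====
-- Loop of A over enumerate(rains); dd is the defaultdict(list).  defaultdict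
-- reads are modelled by getD _ [] (entries created empty by A are only ever
-- read back with default [], so this is observationally exact).  The pyGetD /
-- pySetD / eraseIdx total forms are used only where A's own guards put the
-- index in range, so they agree with Python exactly on every reached state.
def avoidFlood1Loop : List (Int × Int) → List Int → PySem.Dict Int (List Int) → List Int
  | [], res, _ => res
  | (i, val) :: rest, res, dd =>
    if val ≠ 0 then
      let dv := dd.getD val []
      if dv.length = 0 then
        -- res.append(-1); dd[val] += [i]
        avoidFlood1Loop rest (res ++ [-1]) (dd.insert val (dv ++ [i]))
      else
        let d0 := dd.getD 0 []
        if d0.length = 0 then []               -- return []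
        else if PySem.List.pyGetD d0 (-1) 0 < PySem.List.pyGetD dv 0 0 then []  -- dd[0][-1] < dd[val][0]
        else
          let p := PySem.List.pyGetD dv (-1) 0          -- dd[val].pop() (value)
          let dv' := dv.dropLast                         -- dd[val].pop() (effect)
          let pos := PySem.List.bisectLeft d0 p          -- bisect_left(dd[0], p)
          let day := PySem.List.pyGetD d0 (pos : Int) 0  -- dd[0][pos]  (in range: guarded above)
          let res' := PySem.List.pySetD res day val      -- res[dd[0][pos]] = val  (in range: day < i ≤ len res)
          let d0' := d0.eraseIdx pos                     -- dd[0].pop(pos)  (in range: guarded above)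
          avoidFlood1Loop rest (res' ++ [-1]) ((dd.insert 0 d0').insert val (dv' ++ [i]))
    else
      -- res.append(1); dd[0] += [i]
      avoidFlood1Loop rest (res ++ [1]) (dd.insert 0 (dd.getD 0 [] ++ [i]))

def avoidFlood1 (rains : List Int) : List Int :=
  avoidFlood1Loop (PySem.List.enumerate rains 0) [] PySem.Dict.empty

-- ===== PORT B =====
-- _find's first while-loop: walk parent pointers to the root.  The Python
-- while-loop is ported with fuel parent.size + 1, which is proved sufficient
-- below (the walk visits strictly increasing keys of parent).
def findRootLoop (parent : PySem.Dict Int Int) : Int → Nat → Int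
  | r, 0 => r
  | r, fuel + 1 =>
    match parent.get? r with
    | none => r
    | some q => findRootLoop parent q fuel

-- _find's second while-loop: path compression (parent[j], j = r, parent[j]).
-- Same fuel; if fuel ran out early the dict is merely less compressed, which
-- the proofs show is irrelevant (and fuel is proved sufficient for the walk).
def compressLoop : PySem.Dict Int Int → Int → Int → Nat → PySem.Dict Int Int
  | parent, _, _, 0 => parent
  | parent, j, r, fuel + 1 =>
    match parent.get? j with
    | none => parent
    | some q => compressLoop (parent.insert j r) q r fuel

def bFind (parent : PySem.Dict Int Int) (j : Int) : Int × PySem.Dict Int Int :=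
  let r := findRootLoop parent j (parent.size + 1)
  (r, compressLoop parent j r (parent.size + 1))

def avoidFlood1AltLoop : List (Int × Int) → List Int → PySem.Dict Int Int → PySem.Dict Int Int → List Int
  | [], res, _, _ => res
  | (i, v) :: rest, res, parent, last =>
    if v ≠ 0 then
      match last.get? v with
      | some p =>
        let fr := bFind parent (p + 1)
        if fr.1 ≥ i then []                    -- return []
        else
          avoidFlood1AltLoop rest (PySem.List.pySetD res fr.1 v ++ [-1])
            ((fr.2.insert fr.1 (fr.1 + 1)).insert i (i + 1)) (last.insert v i)
      | none =>
        avoidFlood1AltLoop rest (res ++ [-1]) (parent.insert i (i + 1)) (last.insert v i)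
    else
      avoidFlood1AltLoop rest (res ++ [1]) parent last

def avoidFlood1_alt (rains : List Int) : List Int :=
  avoidFlood1AltLoop (PySem.List.enumerate rains 0) [] PySem.Dict.empty PySem.Dict.empty

-- ===== PRECONDITION & SPEC =====
def Spec_avoidFlood1 (rains : List Int) (out : List Int) : Prop := out = avoidFlood1_alt rains
instance (rains : List Int) (out : List Int) : Decidable (Spec_avoidFlood1 rains out) := by unfold Spec_avoidFlood1; infer_instance

-- ===== CLAIM (what is proved, stated in full; the proofs are below) =====
def Claim_equal_avoidFlood1 : Prop := ∀ (rains : List Int), Dom_avoidFlood1 rains → Spec_avoidFlood1 rains (avoidFlood1 rains)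

-- ===== LEMMAS AND PROOFS =====

def pvJumpInv (parent : PySem.Dict Int Int) : Prop :=
  ∀ k q, parent.get? k = some q → k < q ∧ ∀ m, k < m → m < q → parent.get? m ≠ none

def pvInv (i : Int) (dd : PySem.Dict Int (List Int)) (parent last : PySem.Dict Int Int) : Prop :=
  (∀ v : Int, v ≠ 0 → dd.getD v [] = ((last.get? v).map (fun p => [p])).getD [])
  ∧ (dd.getD 0 []).Pairwise (· < ·)
  ∧ (∀ e ∈ dd.getD 0 [], 0 ≤ e ∧ e < i)
  ∧ (∀ v p, last.get? v = some p → 0 ≤ p ∧ p < i ∧ p ∉ dd.getD 0 [])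
  ∧ (∀ k : Int, parent.get? k ≠ none ↔ (0 ≤ k ∧ k < i ∧ k ∉ dd.getD 0 []))
  ∧ pvJumpInv parent
  ∧ parent.keys.Nodup

lemma pv_countP_lt_of_mem {keys : List Int} {j q : Int}
    (hmem : j ∈ keys) (hlt : j < q) :
    keys.countP (fun k => decide (q ≤ k)) < keys.countP (fun k => decide (j ≤ k)) := by
  induction keys with
  | nil => simp at hmem
  | cons a t ih =>
    rcases List.mem_cons.1 hmem with rfl | ha
    · simp only [List.countP_cons]
      have hle : t.countP (fun k => decide (q ≤ k)) ≤ t.countP (fun k => decide (j ≤ k)) :=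
        List.countP_mono_left (fun k _ hk => by simp at hk ⊢; omega)
      simp only [decide_eq_true_eq]
      rw [if_neg (by omega), if_pos (le_refl j)]
      omega
    · have := ih ha
      simp only [List.countP_cons, decide_eq_true_eq]
      by_cases h : q ≤ a
      · rw [if_pos h, if_pos (by omega)]; omega
      · rw [if_neg h]; split <;> omega

lemma pv_findRoot_spec (parent : PySem.Dict Int Int) (j : Int) (fuel : Nat)
    (hj : pvJumpInv parent)
    (hfuel : parent.keys.countP (fun k => decide (j ≤ k)) < fuel) :
    parent.get? (findRootLoop parent j fuel) = none
    ∧ j ≤ findRootLoop parent j fuel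
    ∧ ∀ m, j ≤ m → m < findRootLoop parent j fuel → parent.get? m ≠ none := by
  induction fuel generalizing j with
  | zero => omega
  | succ n ih =>
    rw [findRootLoop]
    cases hget : parent.get? j with
    | none =>
      simp only [hget]
      exact ⟨trivial, le_refl j, fun m h1 h2 => absurd h2 (by omega)⟩
    | some q =>
      have hjq := hj j q hget
      have hmem : j ∈ parent.keys := by
        by_contra hc
        rw [(PySem.Dict.get?_eq_none_iff_not_mem_keys _ _).2 hc] at hget
        simp at hget
      have hcnt := pv_countP_lt_of_mem hmem hjq.1
      have hspec := ih q (by omega)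
      refine ⟨hspec.1, le_trans (le_of_lt hjq.1) hspec.2.1, fun m h1 h2 => ?_⟩
      by_cases hm : m < q
      · rcases lt_or_eq_of_le h1 with h | h
        · exact hjq.2 m h hm
        · rw [← h]; simp [hget]
      · exact hspec.2.2 m (by omega) h2

lemma pv_compress_spec (fuel : Nat) (parent : PySem.Dict Int Int) (j r : Int)
    (hnd : parent.keys.Nodup) (hji : pvJumpInv parent)
    (hr : parent.get? r = none) (hmid : ∀ m, j ≤ m → m < r → parent.get? m ≠ none)
    (hjr : j ≤ r) :
    (∀ k, (compressLoop parent j r fuel).get? k = none ↔ parent.get? k = none)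
    ∧ pvJumpInv (compressLoop parent j r fuel)
    ∧ (compressLoop parent j r fuel).keys.Nodup := by
  induction fuel generalizing parent j with
  | zero => exact ⟨fun k => Iff.rfl, hji, hnd⟩
  | succ n ih =>
    rw [compressLoop]
    cases hget : parent.get? j with
    | none => exact ⟨fun k => Iff.rfl, hji, hnd⟩
    | some q =>
      have hjq := hji j q hget
      have hjltr : j < r := by
        rcases lt_or_eq_of_le hjr with h | h
        · exact h
        · rw [h] at hget; rw [hget] at hr; cases hr
      have hqler : q ≤ r := by
        by_contra hc
        push Not at hc
        exact absurd (hjq.2 r hjltr hc) (by simp [hr])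
      -- facts about parent' := parent.insert j r
      have hgi : ∀ k, (parent.insert j r).get? k = if k = j then some r else parent.get? k :=
        fun k => by rw [PySem.Dict.get?_insert]
      have hdom : ∀ k, (parent.insert j r).get? k = none ↔ parent.get? k = none := by
        intro k
        rw [hgi k]
        split
        · subst ‹k = j›; simp [hget]
        · exact Iff.rfl
      have hji' : pvJumpInv (parent.insert j r) := by
        intro k w hk
        rw [hgi k] at hk
        by_cases hkj : k = j
        · rw [if_pos hkj] at hk
          cases hk
          subst hkj
          refine ⟨hjltr, fun m h1 h2 => ?_⟩
          rw [Ne, hdom m]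
          exact hmid m (le_of_lt h1) h2
        · rw [if_neg hkj] at hk
          have := hji k w hk
          refine ⟨this.1, fun m h1 h2 => ?_⟩
          rw [Ne, hdom m]
          exact this.2 m h1 h2
      have hnd' : (parent.insert j r).keys.Nodup := PySem.Dict.nodup_keys_insert parent j r hnd
      have hr' : (parent.insert j r).get? r = none := by rw [hdom]; exact hr
      have hmid' : ∀ m, q ≤ m → m < r → (parent.insert j r).get? m ≠ none := by
        intro m h1 h2
        rw [Ne, hdom m]
        exact hmid m (le_trans (le_of_lt hjq.1) h1) h2
      have := ih (parent.insert j r) q hnd' hji' hr' hmid' hqler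
      exact ⟨fun k => (this.1 k).trans (hdom k), this.2.1, this.2.2⟩

lemma pv_le_getLast {l : List Int} (hs : l.Pairwise (· < ·)) (hne : l ≠ []) :
    ∀ e ∈ l, e ≤ l.getLast hne := by
  intro e he
  obtain ⟨t, ht, rfl⟩ := List.mem_iff_getElem.1 he
  rw [List.getLast_eq_getElem]
  rcases Nat.lt_or_ge t (l.length - 1) with h | h
  · exact le_of_lt ((List.pairwise_iff_getElem.1 hs) t (l.length - 1) ht (by omega) h)
  · have : t = l.length - 1 := by omega
    subst this; exact le_refl _
lemma pv_mem_eraseIdx_sorted {l : List Int} {pos : Nat} (hpos : pos < l.length)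
    (hs : l.Pairwise (· < ·)) : ∀ e, e ∈ l.eraseIdx pos ↔ (e ∈ l ∧ e ≠ l[pos]) := by
  intro e
  rw [List.eraseIdx_eq_take_drop_succ, List.mem_append]
  constructor
  · rintro (h | h)
    · obtain ⟨t, ht, rfl⟩ := List.mem_iff_getElem.1 h
      rw [List.length_take] at ht
      rw [List.getElem_take] at *
      refine ⟨List.getElem_mem _, ne_of_lt ?_⟩
      exact (List.pairwise_iff_getElem.1 hs) t pos (by omega) hpos (by omega)
    · obtain ⟨t, ht, rfl⟩ := List.mem_iff_getElem.1 h
      rw [List.length_drop] at ht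
      rw [List.getElem_drop] at *
      refine ⟨List.getElem_mem _, ne_of_gt ?_⟩
      exact (List.pairwise_iff_getElem.1 hs) pos (pos + 1 + t) hpos (by omega) (by omega)
  · rintro ⟨he, hne⟩
    obtain ⟨t, ht, rfl⟩ := List.mem_iff_getElem.1 he
    rcases Nat.lt_trichotomy t pos with h | h | h
    · left
      rw [List.mem_iff_getElem]
      exact ⟨t, by rw [List.length_take]; omega, by rw [List.getElem_take]⟩
    · subst h; exact absurd rfl hne
    · right
      rw [List.mem_iff_getElem]
      refine ⟨t - (pos + 1), by rw [List.length_drop]; omega, ?_⟩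
      rw [List.getElem_drop]
      congr 1
      omega

lemma pv_loop_eq (xs : List Int) (i : Int) (res : List Int)
    (dd : PySem.Dict Int (List Int)) (parent last : PySem.Dict Int Int)
    (hinv : pvInv i dd parent last) (hi : 0 ≤ i) :
    avoidFlood1Loop (PySem.List.enumerate xs i) res dd
      = avoidFlood1AltLoop (PySem.List.enumerate xs i) res parent last := by
  induction xs generalizing i res dd parent last with
  | nil => simp [PySem.List.enumerate_nil, avoidFlood1Loop, avoidFlood1AltLoop]
  | cons x xs ih =>
    obtain ⟨h1, h2, h3, h4, h5, h6, h7⟩ := hinv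
    rw [PySem.List.enumerate_cons, avoidFlood1Loop, avoidFlood1AltLoop]
    by_cases hx : x ≠ 0
    · rw [if_pos hx, if_pos hx]
      cases hp : last.get? x with
      | none =>
        have hdv : dd.getD x [] = [] := by rw [h1 x hx, hp]; rfl
        rw [hdv]
        simp only [List.length_nil]
        rw [List.nil_append]
        refine ih (i + 1) (res ++ [-1]) _ _ _ ⟨?_, ?_, ?_, ?_, ?_, ?_, ?_⟩ (by omega)
        · intro v hv
          rw [PySem.Dict.getD_insert, PySem.Dict.get?_insert]
          split
          · rfl
          · exact h1 v hv
        · rw [PySem.Dict.getD_insert, if_neg (Ne.symm hx)]; exact h2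
        · rw [PySem.Dict.getD_insert, if_neg (Ne.symm hx)]
          intro e he; have := h3 e he; omega
        · intro v q hq
          rw [PySem.Dict.getD_insert, if_neg (Ne.symm hx)]
          rw [PySem.Dict.get?_insert] at hq
          split at hq
          · cases hq
            refine ⟨by omega, by omega, fun hc => by have := h3 _ hc; omega⟩
          · have := h4 v q hq; exact ⟨this.1, by omega, this.2.2⟩
        · intro k
          rw [PySem.Dict.getD_insert, if_neg (Ne.symm hx), PySem.Dict.get?_insert]
          split
          · subst ‹k = i›
            simp only [ne_eq, reduceCtorEq, not_false_iff, true_iff]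
            refine ⟨hi, by omega, fun hc => by have := h3 _ hc; omega⟩
          · rw [h5 k]
            constructor
            · rintro ⟨a, b, c⟩; exact ⟨a, by omega, c⟩
            · rintro ⟨a, b, c⟩; exact ⟨a, by omega, c⟩
        · intro k q hk
          rw [PySem.Dict.get?_insert] at hk
          split at hk
          · cases hk
            subst ‹k = i›
            exact ⟨by omega, fun m hm1 hm2 => absurd hm1 (by omega)⟩
          · have := h6 k q hk
            refine ⟨this.1, fun m hm1 hm2 => ?_⟩
            rw [PySem.Dict.get?_insert]
            split
            · simp
            · exact this.2 m hm1 hm2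
        · exact PySem.Dict.nodup_keys_insert parent i (i+1) h7
      | some p =>
        have hdv : dd.getD x [] = [p] := by rw [h1 x hx, hp]; rfl
        have hp4 := h4 x p hp
        rw [hdv]
        simp only [List.length_cons, List.length_nil]
        rw [if_neg (by omega)]
        have hp0 : 0 ≤ p := hp4.1
        have hpi : p < i := hp4.2.1
        have hpnot : p ∉ dd.getD 0 [] := hp4.2.2
        have hpop : PySem.List.pyGetD [p] (-1) 0 = p := by
          rw [PySem.List.pyGetD_neg_one [p] 0 (by simp)]
          rfl
        have hklen : parent.keys.length = parent.size := by
          simp [PySem.Dict.keys, PySem.Dict.size]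
        have hsize : parent.keys.countP (fun k => decide (p + 1 ≤ k)) < parent.size + 1 :=
          lt_of_le_of_lt (le_of_le_of_eq List.countP_le_length hklen) (by omega)
        simp only [bFind]
        rw [hpop]
        obtain ⟨hrnone, hrge, hrmin⟩ := pv_findRoot_spec parent (p + 1) (parent.size + 1) h6 hsize
        set r := findRootLoop parent (p + 1) (parent.size + 1) with hrdef
        have hrpos : 0 ≤ r := by omega
        have hrange : i ≤ r ∨ (r ∈ dd.getD 0 [] ∧ r < i) := by
          by_cases hcase : i ≤ r
          · exact Or.inl hcase
          · right
            refine ⟨?_, by omega⟩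
            by_contra hc
            exact (h5 r).2 ⟨hrpos, by omega, hc⟩ hrnone
        have hminset : ∀ m ∈ dd.getD 0 [], p + 1 ≤ m → r ≤ m := by
          intro m hm hge
          by_contra hc
          exact ((h5 m).1 (hrmin m hge (by omega))).2.2 hm
        by_cases hfail : i ≤ r
        · -- both programs return []
          have hall : ∀ e ∈ dd.getD 0 [], e < p := by
            intro e he
            have h3e := h3 e he
            have h1e : ¬ (p + 1 ≤ e) := fun hc => by have := hminset e he hc; omega
            have h2e : e ≠ p := fun hc => hpnot (hc ▸ he)
            omega
          by_cases hd0nil : dd.getD 0 [] = []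
          · rw [hd0nil]
            simp only [List.length_nil, if_true]
            rw [if_pos (show r ≥ i from hfail)]
          · rw [if_neg (by simpa [List.length_eq_zero_iff] using hd0nil)]
            rw [PySem.List.pyGetD_neg_one (dd.getD 0 []) 0 hd0nil, PySem.List.pyGetD_zero_cons]
            rw [if_pos (hall _ (List.getLast_mem hd0nil)), if_pos (show r ≥ i from hfail)]
        · -- both programs continue
          rw [if_neg hfail]
          have hri : r < i := by omega
          have hrmem : r ∈ dd.getD 0 [] := by
            rcases hrange with h | h
            · omega
            · exact h.1
          have hd0nil : dd.getD 0 [] ≠ [] := fun hc => by rw [hc] at hrmem; cases hrmem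
          rw [if_neg (by simpa [List.length_eq_zero_iff] using hd0nil)]
          have hlastge : ¬ (PySem.List.pyGetD (dd.getD 0 []) (-1) 0 < PySem.List.pyGetD [p] 0 0) := by
            rw [PySem.List.pyGetD_neg_one (dd.getD 0 []) 0 hd0nil, PySem.List.pyGetD_zero_cons]
            have := pv_le_getLast h2 hd0nil r hrmem
            omega
          rw [if_neg hlastge]
          -- the day A picks is exactly the root r that B finds
          obtain ⟨t, ht, hdt⟩ := List.mem_iff_getElem.1 hrmem
          have hspec := PySem.List.bisectLeft_spec (dd.getD 0 []) p (h2.imp le_of_lt)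
          set pos := PySem.List.bisectLeft (dd.getD 0 []) p with hposdef
          have htpos : pos ≤ t := by
            by_contra hc
            have := hspec.2.1 t ht (by omega)
            omega
          have hposlt : pos < (dd.getD 0 []).length := by omega
          have hgep : p ≤ (dd.getD 0 [])[pos] := hspec.2.2 pos hposlt le_rfl
          have hnep : (dd.getD 0 [])[pos] ≠ p := fun hc => hpnot (hc ▸ List.getElem_mem hposlt)
          have hler : r ≤ (dd.getD 0 [])[pos] :=
            hminset _ (List.getElem_mem hposlt) (by omega)
          have hger : (dd.getD 0 [])[pos] ≤ r := by
            rcases Nat.lt_or_ge pos t with h | h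
            · exact le_of_lt (hdt ▸ (List.pairwise_iff_getElem.1 h2) pos t hposlt ht h)
            · have : pos = t := by omega
              subst this
              omega
          have hday : PySem.List.pyGetD (dd.getD 0 []) (pos : Int) 0 = r := by
            rw [PySem.List.pyGetD_natCast, List.getD_eq_getElem _ _ hposlt]
            omega
          rw [hday]
          obtain ⟨hc1, hc2, hc3⟩ := pv_compress_spec (parent.size + 1) parent (p + 1) r h7 h6 hrnone hrmin hrge
          set parent1 := compressLoop parent (p + 1) r (parent.size + 1) with hp1def
          have hrval : (dd.getD 0 [])[pos] = r := by omega
          have hmemE : ∀ e, e ∈ (dd.getD 0 []).eraseIdx pos ↔ (e ∈ dd.getD 0 [] ∧ e ≠ r) := by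
            intro e
            rw [pv_mem_eraseIdx_sorted hposlt h2 e, hrval]
          have hget2 : ∀ k, ((parent1.insert r (r + 1)).insert i (i + 1)).get? k
              = if k = i then some (i + 1) else if k = r then some (r + 1) else parent1.get? k := by
            intro k
            rw [PySem.Dict.get?_insert, PySem.Dict.get?_insert]
          refine ih (i + 1) _ _ _ _ ⟨?_, ?_, ?_, ?_, ?_, ?_, ?_⟩ (by omega)
          · intro v hv
            rw [PySem.Dict.getD_insert, PySem.Dict.get?_insert]
            split
            · simp
            · rw [PySem.Dict.getD_insert, if_neg hv]
              exact h1 v hv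
          · rw [PySem.Dict.getD_insert, if_neg (Ne.symm hx), PySem.Dict.getD_insert_self]
            exact h2.sublist (List.eraseIdx_sublist _ _)
          · rw [PySem.Dict.getD_insert, if_neg (Ne.symm hx), PySem.Dict.getD_insert_self]
            intro e he
            have := h3 e ((hmemE e).1 he).1
            omega
          · intro v q hq
            rw [PySem.Dict.getD_insert, if_neg (Ne.symm hx), PySem.Dict.getD_insert_self]
            rw [PySem.Dict.get?_insert] at hq
            split at hq
            · cases hq
              refine ⟨by omega, by omega, fun hc => ?_⟩
              have := h3 _ ((hmemE _).1 hc).1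
              omega
            · have := h4 v q hq
              exact ⟨this.1, by omega, fun hc => this.2.2 ((hmemE _).1 hc).1⟩
          · intro k
            rw [PySem.Dict.getD_insert, if_neg (Ne.symm hx), PySem.Dict.getD_insert_self, hget2 k]
            split
            · subst ‹k = i›
              simp only [ne_eq, reduceCtorEq, not_false_iff, true_iff]
              refine ⟨hi, by omega, fun hc => ?_⟩
              have := h3 _ ((hmemE _).1 hc).1
              omega
            · split
              · subst ‹k = r›
                simp only [ne_eq, reduceCtorEq, not_false_iff, true_iff]
                exact ⟨hrpos, by omega, fun hc => ((hmemE _).1 hc).2 rfl⟩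
              · rw [Ne, hc1 k, ← Ne, h5 k]
                constructor
                · rintro ⟨a, b, c⟩
                  exact ⟨a, by omega, fun hc => c ((hmemE _).1 hc).1⟩
                · rintro ⟨a, b, c⟩
                  refine ⟨a, by omega, fun hc => c ((hmemE _).2 ⟨hc, ?_⟩)⟩
                  omega
          · intro k q hk
            rw [hget2 k] at hk
            split at hk
            · cases hk
              exact ⟨by omega, fun m hm1 hm2 => absurd hm1 (by omega)⟩
            · split at hk
              · cases hk
                exact ⟨by omega, fun m hm1 hm2 => absurd hm1 (by omega)⟩
              · have := hc2 k q hk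
                refine ⟨this.1, fun m hm1 hm2 => ?_⟩
                rw [hget2 m]
                split
                · simp
                · split
                  · simp
                  · exact this.2 m hm1 hm2
          · exact PySem.Dict.nodup_keys_insert _ i (i + 1)
              (PySem.Dict.nodup_keys_insert _ r (r + 1) hc3)
    · rw [if_neg hx, if_neg hx]
      push Not at hx
      subst hx
      refine ih (i + 1) (res ++ [1]) _ _ _ ⟨?_, ?_, ?_, ?_, ?_, ?_, ?_⟩ (by omega)
      · intro v hv
        rw [PySem.Dict.getD_insert, if_neg hv]
        exact h1 v hv
      · rw [PySem.Dict.getD_insert_self]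
        rw [List.pairwise_append]
        exact ⟨h2, List.pairwise_singleton _ _, fun a ha b hb => by
          rw [List.mem_singleton] at hb; subst hb; exact (h3 a ha).2⟩
      · rw [PySem.Dict.getD_insert_self]
        intro e he
        rcases List.mem_append.1 he with h | h
        · have := h3 e h; omega
        · rw [List.mem_singleton] at h; omega
      · intro v q hq
        rw [PySem.Dict.getD_insert_self]
        have := h4 v q hq
        refine ⟨this.1, by omega, fun hc => ?_⟩
        rcases List.mem_append.1 hc with h | h
        · exact this.2.2 h
        · rw [List.mem_singleton] at h; omega
      · intro k
        rw [PySem.Dict.getD_insert_self, h5 k]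
        constructor
        · rintro ⟨a, b, c⟩
          refine ⟨a, by omega, fun hc => ?_⟩
          rcases List.mem_append.1 hc with h | h
          · exact c h
          · rw [List.mem_singleton] at h; omega
        · rintro ⟨a, b, c⟩
          have hki : k ≠ i := fun hc => c (by rw [hc]; exact List.mem_append.2 (Or.inr (List.mem_singleton.2 rfl)))
          exact ⟨a, by omega, fun hc => c (List.mem_append.2 (Or.inl hc))⟩
      · exact h6
      · exact h7

lemma pv_inv_init : pvInv 0 PySem.Dict.empty PySem.Dict.empty PySem.Dict.empty := by
  refine ⟨?_, ?_, ?_, ?_, ?_, ?_, ?_⟩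
  · intro v hv
    simp [pysem]
  · simp [pysem]
  · simp [pysem]
  · intro v q hq
    simp [pysem] at hq
  · intro k
    simp [pysem]
  · intro k q hk
    simp [pysem] at hk
  · simp [pysem]

-- ===== VERDICT (by name: the statement is the Claim_ definition above) =====
theorem avoidFlood1_spec : Claim_equal_avoidFlood1 := by
  intro rains _
  show avoidFlood1 rains = avoidFlood1_alt rains
  unfold avoidFlood1 avoidFlood1_alt
  exact pv_loop_eq rains 0 [] _ _ _ pv_inv_init le_rfl
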